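-- pv_equiv track=rewrite | github.com/napari-phasors/napari-phasors | src/napari_phasors/_widget.py | _choose_signal_axis
-- ===== SOURCE A (Python) =====
-- def _choose_signal_axis(shape, axis_labels=None):
--     """Return the axis index corresponding to histogram/spectral bins."""
--     ndim = len(shape)
--     if ndim == 0:
--         return 0
--
--     if axis_labels is not None and len(axis_labels) == ndim:
--         labels = [str(label).strip().upper() for label in axis_labels]
--
--         # Prefer explicit histogram/time/spectral labels.
--         for candidates in (
--             {"H", "HIST", "HISTOGRAM"},
--             {"C", "CHANNEL", "CHANNELS", "L", "WL", "W"},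
--             {"T", "TIME"},
--         ):
--             for idx, label in enumerate(labels):
--                 if label in candidates or any(
--                     token in label
--                     for token in ("HIST", "SPECT", "WAVEL", "LAMBDA")
--                 ):
--                     return idx
--
--         # Avoid spatial axes if possible.
--         non_spatial = [
--             idx
--             for idx, label in enumerate(labels)
--             if label not in {"Z", "Y", "X"}
--         ]
--         if non_spatial:
--             return non_spatial[-1]
--
--     # Fallback to last axis, preserving previous behavior.
--     return ndim - 1
-- ===== SOURCE B (Python) =====
-- def _choose_signal_axis(shape, axis_labels=None):
--     """Return the axis index corresponding to histogram/spectral bins."""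
--     ndim = len(shape)
--     if ndim == 0:
--         return 0
--     if axis_labels is None or len(axis_labels) != ndim:
--         return ndim - 1
--
--     best = None  # (rank, idx): smallest rank wins, earliest index breaks ties
--     fallback = ndim - 1  # last non-spatial index, if any
--     for idx, raw in enumerate(axis_labels):
--         label = str(raw).strip().upper()
--         if label in {"H", "HIST", "HISTOGRAM"} or any(
--             token in label for token in ("HIST", "SPECT", "WAVEL", "LAMBDA")
--         ):
--             rank = 0
--         elif label in {"C", "CHANNEL", "CHANNELS", "L", "WL", "W"}:
--             rank = 1
--         elif label in {"T", "TIME"}: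
--             rank = 2
--         else:
--             rank = None
--         if rank is not None and (best is None or rank < best[0]):
--             best = (rank, idx)
--         if label not in {"Z", "Y", "X"}:
--             fallback = idx
--     return best[1] if best is not None else fallback
-- ===== Notes on version B (the rewrite author's own statement) =====
-- stated objective: alternative
-- what changed: A makes three sequential scans over the labels (one per candidate set) plus a separate list comprehension for the non-spatial fallback; B does a single pass that assigns each label a priority rank, keeps the earliest smallest-rank index, and tracks the last non-spatial index as it goes.
import Mathlib
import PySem

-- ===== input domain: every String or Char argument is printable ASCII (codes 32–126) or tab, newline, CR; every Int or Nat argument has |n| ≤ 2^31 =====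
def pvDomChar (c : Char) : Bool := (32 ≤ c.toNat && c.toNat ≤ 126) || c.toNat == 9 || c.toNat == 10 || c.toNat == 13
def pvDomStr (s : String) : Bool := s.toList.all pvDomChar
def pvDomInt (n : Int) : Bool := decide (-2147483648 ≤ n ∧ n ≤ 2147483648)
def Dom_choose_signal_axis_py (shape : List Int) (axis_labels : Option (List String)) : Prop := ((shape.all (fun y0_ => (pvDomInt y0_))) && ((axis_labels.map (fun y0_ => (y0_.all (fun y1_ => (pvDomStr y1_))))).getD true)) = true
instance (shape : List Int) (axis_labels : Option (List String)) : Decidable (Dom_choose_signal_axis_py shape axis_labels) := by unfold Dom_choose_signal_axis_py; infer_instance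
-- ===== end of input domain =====

-- B replaces A's three sequential scans (one per candidate set) by a single pass that
-- assigns each label a priority rank and keeps the best rank / last non-spatial index;
-- objective: alternative single-pass decomposition (same asymptotic cost).

-- ===== PORT A =====
def pvA_norm (s : String) : String := PySem.Str.upper (PySem.Str.strip s)

def pvA_tokenMatch (label : String) : Bool :=
  ["HIST", "SPECT", "WAVEL", "LAMBDA"].any (fun t => PySem.Str.isIn t label)

-- "for idx, label in enumerate(labels): if label in candidates or any(...): return idx"
def pvA_scan (cands : List String) : List (Int × String) → Option Int
  | [] => none
  | (idx, label) :: rest =>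
      if cands.contains label || pvA_tokenMatch label then some idx
      else pvA_scan cands rest

def choose_signal_axis_py (shape : List Int) (axis_labels : Option (List String)) : Int :=
  let ndim : Int := (shape.length : Int)
  if ndim = 0 then 0
  else
    let core : Option Int :=
      match axis_labels with
      | none => none
      | some als =>
          if (als.length : Int) = ndim then
            let labels := als.map pvA_norm
            match
              [["H", "HIST", "HISTOGRAM"],
               ["C", "CHANNEL", "CHANNELS", "L", "WL", "W"],
               ["T", "TIME"]].findSome?
                (fun cands => pvA_scan cands (PySem.List.enumerate labels)) with
            | some idx => some idx
            | none =>
                let non_spatial :=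
                  ((PySem.List.enumerate labels).filter
                    (fun p => !(["Z", "Y", "X"].contains p.2))).map (·.1)
                non_spatial.getLast?
          else none
    match core with
    | some idx => idx
    | none => ndim - 1

-- ===== PORT B =====
def pvB_rank (label : String) : Option Int :=
  if ["H", "HIST", "HISTOGRAM"].contains label
      || ["HIST", "SPECT", "WAVEL", "LAMBDA"].any (fun t => PySem.Str.isIn t label) then
    some 0
  else if ["C", "CHANNEL", "CHANNELS", "L", "WL", "W"].contains label then some 1
  else if ["T", "TIME"].contains label then some 2
  else none

def pvB_step (st : Option (Int × Int) × Int) (p : Int × String) : Option (Int × Int) × Int :=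
  let label := PySem.Str.upper (PySem.Str.strip p.2)
  let best :=
    match pvB_rank label, st.1 with
    | none, b => b
    | some r, none => some (r, p.1)
    | some r, some (br, bi) => if r < br then some (r, p.1) else some (br, bi)
  let fb := if ["Z", "Y", "X"].contains label then st.2 else p.1
  (best, fb)

def choose_signal_axis_py_alt (shape : List Int) (axis_labels : Option (List String)) : Int :=
  let ndim : Int := (shape.length : Int)
  if ndim = 0 then 0
  else
    match axis_labels with
    | none => ndim - 1
    | some als =>
        if (als.length : Int) ≠ ndim then ndim - 1
        else
          let st := (PySem.List.enumerate als).foldl pvB_step (none, ndim - 1)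
          match st.1 with
          | some (_, i) => i
          | none => st.2

-- ===== PRECONDITION & SPEC =====
def Spec_choose_signal_axis_py (shape : List Int) (axis_labels : Option (List String)) (out : Int) : Prop := out = choose_signal_axis_py_alt shape axis_labels
instance (shape : List Int) (axis_labels : Option (List String)) (out : Int) : Decidable (Spec_choose_signal_axis_py shape axis_labels out) := by unfold Spec_choose_signal_axis_py; infer_instance

-- ===== CLAIM (what is proved, stated in full; the proofs are below) =====
def Claim_equal_choose_signal_axis_py : Prop := ∀ (shape : List Int) (axis_labels : Option (List String)), Dom_choose_signal_axis_py shape axis_labels → Spec_choose_signal_axis_py shape axis_labels (choose_signal_axis_py shape axis_labels)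

-- ===== LEMMAS AND PROOFS =====

/-- Label predicates used by both characterizations. -/
def pvQ0 (l : String) : Bool := ["H", "HIST", "HISTOGRAM"].contains l || pvA_tokenMatch l
def pvP1 (l : String) : Bool := ["C", "CHANNEL", "CHANNELS", "L", "WL", "W"].contains l
def pvP2 (l : String) : Bool := ["T", "TIME"].contains l

/-- First index whose label satisfies `q`. -/
def pvFirst (q : String → Bool) : List (Int × String) → Option Int
  | [] => none
  | p :: r => if q p.2 then some p.1 else pvFirst q r

/-- B's step with the normalization pulled out. -/
def pvStep (st : Option (Int × Int) × Int) (p : Int × String) : Option (Int × Int) × Int :=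
  (match pvB_rank p.2, st.1 with
   | none, b => b
   | some r, none => some (r, p.1)
   | some r, some (br, bi) => if r < br then some (r, p.1) else some (br, bi),
   if ["Z", "Y", "X"].contains p.2 then st.2 else p.1)

theorem pvB_rank_eq (l : String) :
    pvB_rank l
      = if pvQ0 l then some 0 else if pvP1 l then some 1 else if pvP2 l then some 2 else none := rfl

theorem pvStep_eq_step (st : Option (Int × Int) × Int) (p : Int × String) :
    pvB_step st p = pvStep st (p.1, pvA_norm p.2) := by
  obtain ⟨b, f⟩ := st
  simp only [pvB_step, pvStep, pvA_norm]

theorem pvA_scan_eq_first (cands : List String) (M : List (Int × String)) :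
    pvA_scan cands M = pvFirst (fun l => cands.contains l || pvA_tokenMatch l) M := by
  induction M with
  | nil => rfl
  | cons p r ih => cases p with | mk i l => simp [pvA_scan, pvFirst, ih]

theorem pvFirst_congr {q q' : String → Bool} {M : List (Int × String)}
    (h : ∀ p ∈ M, q p.2 = q' p.2) : pvFirst q M = pvFirst q' M := by
  induction M with
  | nil => rfl
  | cons p r ih =>
      simp only [pvFirst, h p (by simp)]
      rw [ih (fun p hp => h p (by simp [hp]))]

theorem pvFirst_none {q : String → Bool} {M : List (Int × String)}
    (h : pvFirst q M = none) : ∀ p ∈ M, q p.2 = false := by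
  induction M with
  | nil => intro p hp; cases hp
  | cons p r ih =>
      intro p' hp'
      by_cases hq : q p.2
      · simp [pvFirst, hq] at h
      · rcases List.mem_cons.mp hp' with h1 | h2
        · rw [h1]; simpa using hq
        · exact ih (by simpa [pvFirst, hq] using h) _ h2

theorem pvFold_eq (als : List String) (st : Option (Int × Int) × Int) :
    (PySem.List.enumerate als).foldl pvB_step st
      = (PySem.List.enumerate (als.map pvA_norm)).foldl pvStep st := by
  have aux : ∀ (xs : List String) (s : Int) (st : Option (Int × Int) × Int),
      (PySem.List.enumerate xs s).foldl pvB_step st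
        = (PySem.List.enumerate (xs.map pvA_norm) s).foldl pvStep st := by
    intro xs
    induction xs with
    | nil =>
        intro s st
        rw [List.map_nil, PySem.List.enumerate_nil, List.foldl_nil, List.foldl_nil]
    | cons a r ih =>
        intro s st
        rw [List.map_cons, PySem.List.enumerate_cons, PySem.List.enumerate_cons,
          List.foldl_cons, List.foldl_cons, pvStep_eq_step]
        exact ih _ _
  exact aux als 0 st

-- step reductions
theorem pvStep_none {p : Int × String} (h : pvB_rank p.2 = none)
    (st : Option (Int × Int) × Int) :
    pvStep st p = (st.1, if ["Z", "Y", "X"].contains p.2 then st.2 else p.1) := by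
  simp [pvStep, h]

theorem pvStep_some_none {p : Int × String} {r : Int} (h : pvB_rank p.2 = some r) (f : Int) :
    pvStep (none, f) p
      = (some (r, p.1), if ["Z", "Y", "X"].contains p.2 then f else p.1) := by
  simp [pvStep, h]

theorem pvStep_some_some {p : Int × String} {r : Int} (h : pvB_rank p.2 = some r)
    (br bi f : Int) :
    pvStep (some (br, bi), f) p
      = (if r < br then some (r, p.1) else some (br, bi),
         if ["Z", "Y", "X"].contains p.2 then f else p.1) := by
  simp [pvStep, h]

-- characterization of the fold's first component
theorem pvFold_fst_zero (M : List (Int × String)) (b : Int) (f : Int) :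
    (M.foldl pvStep (some (0, b), f)).1 = some (0, b) := by
  induction M generalizing f with
  | nil => rfl
  | cons p r ih =>
      rw [List.foldl_cons]
      rcases hr : pvB_rank p.2 with _ | r0
      · rw [pvStep_none hr]; exact ih _
      · have hge : ¬ r0 < 0 := by
          rw [pvB_rank_eq] at hr; split_ifs at hr <;> simp_all <;> omega
        rw [pvStep_some_some hr, if_neg hge]
        exact ih _

theorem pvFold_fst_one (M : List (Int × String)) (b : Int) (f : Int) :
    (M.foldl pvStep (some (1, b), f)).1
      = match pvFirst pvQ0 M with
        | some j => some (0, j)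
        | none => some (1, b) := by
  induction M generalizing f with
  | nil => rfl
  | cons p r ih =>
      rw [List.foldl_cons]
      by_cases h0 : pvQ0 p.2
      · have hr : pvB_rank p.2 = some 0 := by rw [pvB_rank_eq, if_pos h0]
        rw [pvStep_some_some hr, if_pos (by norm_num : (0 : Int) < 1), pvFold_fst_zero]
        simp [pvFirst, h0]
      · have hf0 : pvFirst pvQ0 (p :: r) = pvFirst pvQ0 r := by simp [pvFirst, h0]
        rw [hf0]
        rcases hr : pvB_rank p.2 with _ | r0
        · rw [pvStep_none hr]; exact ih _
        · have hge : ¬ r0 < 1 := by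
            rw [pvB_rank_eq, if_neg h0] at hr; split_ifs at hr <;> simp_all <;> omega
          rw [pvStep_some_some hr, if_neg hge]
          exact ih _

theorem pvFold_fst_two (M : List (Int × String)) (b : Int) (f : Int) :
    (M.foldl pvStep (some (2, b), f)).1
      = match pvFirst pvQ0 M with
        | some j => some (0, j)
        | none =>
          match pvFirst (fun l => !pvQ0 l && pvP1 l) M with
          | some j => some (1, j)
          | none => some (2, b) := by
  induction M generalizing f with
  | nil => rfl
  | cons p r ih =>
      rw [List.foldl_cons]
      by_cases h0 : pvQ0 p.2
      · have hr : pvB_rank p.2 = some 0 := by rw [pvB_rank_eq, if_pos h0]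
        rw [pvStep_some_some hr, if_pos (by norm_num : (0 : Int) < 2), pvFold_fst_zero]
        simp [pvFirst, h0]
      · have hf0 : pvFirst pvQ0 (p :: r) = pvFirst pvQ0 r := by simp [pvFirst, h0]
        rw [hf0]
        by_cases h1 : pvP1 p.2
        · have hr : pvB_rank p.2 = some 1 := by rw [pvB_rank_eq, if_neg h0, if_pos h1]
          have hc1 : pvFirst (fun l => !pvQ0 l && pvP1 l) (p :: r) = some p.1 := by
            simp [pvFirst, h0, h1]
          rw [pvStep_some_some hr, if_pos (by norm_num : (1 : Int) < 2), pvFold_fst_one, hc1]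
        · have hc1 : pvFirst (fun l => !pvQ0 l && pvP1 l) (p :: r)
              = pvFirst (fun l => !pvQ0 l && pvP1 l) r := by
            simp [pvFirst, h0, h1]
          rw [hc1]
          rcases hr : pvB_rank p.2 with _ | r0
          · rw [pvStep_none hr]; exact ih _
          · have hge : ¬ r0 < 2 := by
              rw [pvB_rank_eq, if_neg h0, if_neg h1] at hr; split_ifs at hr <;> simp_all <;> omega
            rw [pvStep_some_some hr, if_neg hge]
            exact ih _

theorem pvFold_fst_none (M : List (Int × String)) (f : Int) :
    (M.foldl pvStep (none, f)).1
      = match pvFirst pvQ0 M with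
        | some j => some (0, j)
        | none =>
          match pvFirst (fun l => !pvQ0 l && pvP1 l) M with
          | some j => some (1, j)
          | none =>
            match pvFirst (fun l => !pvQ0 l && !pvP1 l && pvP2 l) M with
            | some j => some (2, j)
            | none => none := by
  induction M generalizing f with
  | nil => rfl
  | cons p r ih =>
      rw [List.foldl_cons]
      by_cases h0 : pvQ0 p.2
      · have hr : pvB_rank p.2 = some 0 := by rw [pvB_rank_eq, if_pos h0]
        rw [pvStep_some_none hr, pvFold_fst_zero]
        simp [pvFirst, h0]
      · have hf0 : pvFirst pvQ0 (p :: r) = pvFirst pvQ0 r := by simp [pvFirst, h0]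
        rw [hf0]
        by_cases h1 : pvP1 p.2
        · have hr : pvB_rank p.2 = some 1 := by rw [pvB_rank_eq, if_neg h0, if_pos h1]
          have hc1 : pvFirst (fun l => !pvQ0 l && pvP1 l) (p :: r) = some p.1 := by
            simp [pvFirst, h0, h1]
          rw [pvStep_some_none hr, pvFold_fst_one, hc1]
        · have hc1 : pvFirst (fun l => !pvQ0 l && pvP1 l) (p :: r)
              = pvFirst (fun l => !pvQ0 l && pvP1 l) r := by
            simp [pvFirst, h0, h1]
          rw [hc1]
          by_cases h2 : pvP2 p.2
          · have hr : pvB_rank p.2 = some 2 := by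
              rw [pvB_rank_eq, if_neg h0, if_neg h1, if_pos h2]
            have hc2 : pvFirst (fun l => !pvQ0 l && !pvP1 l && pvP2 l) (p :: r) = some p.1 := by
              simp [pvFirst, h0, h1, h2]
            rw [pvStep_some_none hr, pvFold_fst_two, hc2]
          · have hr : pvB_rank p.2 = none := by
              rw [pvB_rank_eq, if_neg h0, if_neg h1, if_neg h2]
            have hc2 : pvFirst (fun l => !pvQ0 l && !pvP1 l && pvP2 l) (p :: r)
                = pvFirst (fun l => !pvQ0 l && !pvP1 l && pvP2 l) r := by
              simp [pvFirst, h0, h1, h2]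
            rw [hc2, pvStep_none hr]
            exact ih _

-- characterization of the fold's second component
theorem pvFold_snd (M : List (Int × String)) (b : Option (Int × Int)) (f : Int) :
    (M.foldl pvStep (b, f)).2
      = match ((M.filter (fun p => !(["Z", "Y", "X"].contains p.2))).map (·.1)).getLast? with
        | some i => i
        | none => f := by
  induction M generalizing b f with
  | nil => rfl
  | cons p r ih =>
      rw [List.foldl_cons]
      have hstep : pvStep (b, f) p
          = ((pvStep (b, f) p).1, if ["Z", "Y", "X"].contains p.2 then f else p.1) := rfl
      rw [hstep, ih]
      by_cases hz : ["Z", "Y", "X"].contains p.2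
      · have hcond : ¬ ((!(["Z", "Y", "X"].contains p.2)) = true) := by rw [hz]; simp
        rw [List.filter_cons, if_neg hcond, if_pos hz]
      · have hzf : ["Z", "Y", "X"].contains p.2 = false := Bool.eq_false_iff.mpr hz
        have hcond : (!(["Z", "Y", "X"].contains p.2)) = true := by rw [hzf]; rfl
        rw [List.filter_cons, if_pos hcond, List.map_cons, List.getLast?_cons, if_neg hz]
        rcases hl : ((r.filter (fun p => !(["Z", "Y", "X"].contains p.2))).map (·.1)).getLast?
          with _ | j
        · rw [hl]; rfl
        · rw [hl]; rfl

theorem pvToken_q0 {l : String} (h : pvA_tokenMatch l = true) : pvQ0 l = true := by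
  simp [pvQ0, h]

-- ===== VERDICT (by name: the statement is the Claim_ definition above) =====
theorem choose_signal_axis_py_spec : Claim_equal_choose_signal_axis_py := by
  intro shape axis_labels _
  unfold Spec_choose_signal_axis_py choose_signal_axis_py choose_signal_axis_py_alt
  by_cases hnd : (shape.length : Int) = 0
  · simp [hnd]
  · simp only [if_neg hnd]
    cases axis_labels with
    | none => simp
    | some als =>
        by_cases hlen : (als.length : Int) = (shape.length : Int)
        · simp only [hlen, ne_eq, not_true_eq_false]
          set N := PySem.List.enumerate (List.map pvA_norm als) with hN
          rw [pvFold_eq als (none, (shape.length : Int) - 1), ← hN]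
          have hfst := pvFold_fst_none N ((shape.length : Int) - 1)
          have hsnd := pvFold_snd N none ((shape.length : Int) - 1)
          simp only [List.findSome?]
          rw [pvA_scan_eq_first, pvA_scan_eq_first, pvA_scan_eq_first]
          have e0 : pvFirst (fun l => ["H", "HIST", "HISTOGRAM"].contains l || pvA_tokenMatch l) N
              = pvFirst pvQ0 N := rfl
          rw [e0]
          rcases h0 : pvFirst pvQ0 N with _ | i
          · have hall := pvFirst_none h0
            have htok : ∀ p ∈ N, pvA_tokenMatch p.2 = false := by
              intro p hp
              by_contra hc
              have := pvToken_q0 (by simpa using (Bool.of_not_eq_false hc))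
              rw [hall p hp] at this; cases this
            have e1 : pvFirst
                (fun l => ["C", "CHANNEL", "CHANNELS", "L", "WL", "W"].contains l
                  || pvA_tokenMatch l) N
                = pvFirst (fun l => !pvQ0 l && pvP1 l) N := by
              apply pvFirst_congr
              intro p hp
              simp [htok p hp, hall p hp, pvP1]
            rw [e1]
            rcases h1 : pvFirst (fun l => !pvQ0 l && pvP1 l) N with _ | i
            · have hall1 := pvFirst_none h1
              have hp1 : ∀ p ∈ N, pvP1 p.2 = false := by
                intro p hp
                have := hall1 p hp
                simpa [hall p hp] using this
              have e2 : pvFirst (fun l => ["T", "TIME"].contains l || pvA_tokenMatch l) N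
                  = pvFirst (fun l => !pvQ0 l && !pvP1 l && pvP2 l) N := by
                apply pvFirst_congr
                intro p hp
                simp [htok p hp, hall p hp, hp1 p hp, pvP2]
              rw [e2]
              rcases h2 : pvFirst (fun l => !pvQ0 l && !pvP1 l && pvP2 l) N with _ | i
              · -- fallback: last non-spatial index on both sides
                have hb : (N.foldl pvStep (none, (shape.length : Int) - 1)).1 = none := by
                  rw [hfst, h0, h1, h2]
                simp [hb, hsnd]
              · simp [h0, h1, h2, hfst]
            · simp [h0, h1, hfst]
          · simp [h0, hfst]
        · have : ¬ ((als.length : Int) = (shape.length : Int)) := hlen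
          simp [this]
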